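-- pv_equiv track=rewrite | github.com/gmazu/calypso-integration-landscape | Gantt/Manim/gantt_timeline_v4.0.0.py | filter_by_levels
-- ===== SOURCE A (Python) =====
-- def filter_by_levels(tasks: list[list], levels: list[int]) -> list[list]:
--     """Filtra por niveles e incluye ancestros para dar contexto visual."""
--     if not levels:
--         return tasks
--     level_set = set(levels)
--     result: list[list] = []
--     seen: set[tuple] = set()
--     stack: list[list] = []
--
--     for row in tasks:
--         level = row[1]
--         while stack and stack[-1][1] >= level:
--             stack.pop()
--         stack.append(row)
--
--         if level in level_set:
--             # Incluir ancestros y la fila actual sin duplicados.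
--             for parent in stack:
--                 key = tuple(parent)
--                 if key not in seen:
--                     result.append(parent)
--                     seen.add(key)
--
--     return result
-- ===== SOURCE B (Python) =====
-- def filter_by_levels(tasks: list[list], levels: list[int]) -> list[list]:
--     """Two staged passes, no ancestor stack: a backward scan computes for each row
--     whether it matches a level or is an ancestor of a later match (via a running
--     threshold m = the minimum level on the way down to the nearest match); a
--     forward scan then emits the flagged rows in input order, deduped by content."""
--     if not levels:
--         return tasks
--     level_set = set(levels)
--     n = len(tasks)
--     inc = [False] * n
--     m = None  # rows with level < m are ancestors of some later matched row
--     for i in range(n - 1, -1, -1):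
--         lvl = tasks[i][1]
--         inc[i] = lvl in level_set or (m is not None and lvl < m)
--         if lvl in level_set:
--             m = lvl
--         elif m is not None and lvl < m:
--             m = lvl
--     result: list[list] = []
--     seen: set[tuple] = set()
--     for i, row in enumerate(tasks):
--         if inc[i]:
--             key = tuple(row)
--             if key not in seen:
--                 result.append(row)
--                 seen.add(key)
--     return result
-- ===== Notes on version B (the rewrite author's own statement) =====
-- stated objective: alternative
-- what changed: B replaces A's monotonic ancestor stack (rescanned against a seen-set at every match) by two staged passes with no stack at all: a backward scan computes per row a boolean 'emit' flag via a running ancestor threshold (minimum level down to the nearest later match), then a forward scan emits the flagged rows in order, deduped by content.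
import Mathlib
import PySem

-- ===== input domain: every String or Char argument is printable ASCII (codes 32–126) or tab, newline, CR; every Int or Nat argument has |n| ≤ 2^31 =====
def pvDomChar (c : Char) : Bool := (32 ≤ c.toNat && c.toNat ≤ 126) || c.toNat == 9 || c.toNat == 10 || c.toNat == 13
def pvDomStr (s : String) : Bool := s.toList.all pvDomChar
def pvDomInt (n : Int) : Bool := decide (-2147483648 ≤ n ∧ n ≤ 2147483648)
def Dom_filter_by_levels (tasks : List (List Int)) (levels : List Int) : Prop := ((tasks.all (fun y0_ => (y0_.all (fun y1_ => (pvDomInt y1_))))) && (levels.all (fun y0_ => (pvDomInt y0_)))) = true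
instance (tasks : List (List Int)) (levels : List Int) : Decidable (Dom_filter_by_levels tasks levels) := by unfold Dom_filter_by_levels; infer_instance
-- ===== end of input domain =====

-- B drops A's ancestor stack entirely: a backward scan computes per-row emit flags
-- via a running ancestor threshold, then a forward scan emits the flagged rows
-- deduped by content (alternative decomposition, same exact output).

-- ===== PORT A =====
-- row[1]; exact under Pre_ (every row has length ≥ 2 when levels ≠ [])
def pvLvl (row : List Int) : Int := (PySem.List.pyGet? row 1).getD 0

-- 'while stack and stack[-1][1] >= level: stack.pop()' — stack stored TOP-FIRST
-- (Python's stack[-1] is the head here, append = cons, pop = tail).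
def pvPop (stack : List (List Int)) (level : Int) : List (List Int) :=
  match stack with
  | [] => []
  | top :: rest => if level ≤ pvLvl top then pvPop rest level else top :: rest

-- 'for parent in stack: key = tuple(parent); if key not in seen: result.append(parent); seen.add(key)'
def pvEmitA (rs : List (List Int) × PySem.Set (List Int)) (parents : List (List Int)) :
    List (List Int) × PySem.Set (List Int) :=
  parents.foldl
    (fun rs parent =>
      if PySem.Set.contains rs.2 parent then rs
      else (rs.1 ++ [parent], PySem.Set.add rs.2 parent)) rs

-- loop body of A; state = (result, seen, stack); stack.reverse iterates bottom→top as Python does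
def pvStepA (lset : PySem.Set Int)
    (st : List (List Int) × PySem.Set (List Int) × List (List Int)) (row : List Int) :
    List (List Int) × PySem.Set (List Int) × List (List Int) :=
  let level := pvLvl row
  let stack := row :: pvPop st.2.2 level
  if PySem.Set.contains lset level then
    let rs := pvEmitA (st.1, st.2.1) stack.reverse
    (rs.1, rs.2, stack)
  else (st.1, st.2.1, stack)

def filter_by_levels (tasks : List (List Int)) (levels : List Int) : List (List Int) :=
  if levels = [] then tasks
  else (tasks.foldl (pvStepA (PySem.Set.ofList levels)) ([], PySem.Set.empty, [])).1

-- ===== PORT B =====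
-- Source B's backward index loop 'for i in range(n-1, -1, -1)', rendered as structural
-- recursion from the right; returns (inc flags in index order, final threshold m).
def pvIncB (lset : PySem.Set Int) : List (List Int) → List Bool × Option Int
  | [] => ([], none)
  | row :: rest =>
      let fm := pvIncB lset rest
      let lvl := pvLvl row
      let inc := PySem.Set.contains lset lvl ||
                 (match fm.2 with | some mv => decide (lvl < mv) | none => false)
      let m' := if PySem.Set.contains lset lvl then some lvl
                else match fm.2 with | some mv => some (min lvl mv) | none => none
      (inc :: fm.1, m')

-- Source B's forward pass 'for i, row in enumerate(tasks): if inc[i]: …'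
def filter_by_levels_alt (tasks : List (List Int)) (levels : List Int) : List (List Int) :=
  if levels = [] then tasks
  else
    let lset := PySem.Set.ofList levels
    let inc := (pvIncB lset tasks).1
    ((tasks.zip inc).foldl
      (fun rs p =>
        if p.2 then
          if PySem.Set.contains rs.2 p.1 then rs
          else (rs.1 ++ [p.1], PySem.Set.add rs.2 p.1)
        else rs) ([], PySem.Set.empty)).1

-- ===== PRECONDITION & SPEC =====
-- Pre_ excludes exactly the inputs where Python A raises IndexError: when levels ≠ [],
-- A reads row[1] of every row, so every row must have length ≥ 2.
def Pre_filter_by_levels (tasks : List (List Int)) (levels : List Int) : Prop :=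
  levels = [] ∨ ∀ row ∈ tasks, 2 ≤ row.length
instance (tasks : List (List Int)) (levels : List Int) : Decidable (Pre_filter_by_levels tasks levels) := by
  unfold Pre_filter_by_levels; infer_instance

def pvWitness_filter_by_levels : List (List Int) × List Int := ([[0, 0], [1, 1]], [1])

def Spec_filter_by_levels (tasks : List (List Int)) (levels : List Int) (out : List (List Int)) : Prop := out = filter_by_levels_alt tasks levels
instance (tasks : List (List Int)) (levels : List Int) (out : List (List Int)) : Decidable (Spec_filter_by_levels tasks levels out) := by unfold Spec_filter_by_levels; infer_instance

-- ===== CLAIM (what is proved, stated in full; the proofs are below) =====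
def Claim_equal_filter_by_levels : Prop := ∀ (tasks : List (List Int)) (levels : List Int), Dom_filter_by_levels tasks levels → Pre_filter_by_levels tasks levels → Spec_filter_by_levels tasks levels (filter_by_levels tasks levels)

-- ===== LEMMAS AND PROOFS =====

-- ---- generic facts about the dedup-emit fold pvEmitA ----

theorem pvEmitA_append (rs : List (List Int) × PySem.Set (List Int)) (a b : List (List Int)) :
    pvEmitA rs (a ++ b) = pvEmitA (pvEmitA rs a) b := by
  simp [pvEmitA, List.foldl_append]

-- seen only grows along the emit loop
theorem pvEmitA_mono (l : List (List Int)) (rs : List (List Int) × PySem.Set (List Int))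
    (x : List Int) (h : PySem.Set.contains rs.2 x = true) :
    PySem.Set.contains (pvEmitA rs l).2 x = true := by
  induction l generalizing rs with
  | nil => exact h
  | cons p l ih =>
    simp only [pvEmitA, List.foldl_cons] at *
    split
    · exact ih rs h
    · apply ih
      simp only [PySem.Set.add, PySem.Set.contains, List.contains_eq_mem, decide_eq_true_eq] at *
      split
      · exact h
      · simp [h]

-- every scanned element ends up in seen
theorem pvEmitA_mem (l : List (List Int)) (rs : List (List Int) × PySem.Set (List Int))
    (x : List Int) (h : x ∈ l) :
    PySem.Set.contains (pvEmitA rs l).2 x = true := by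
  induction l generalizing rs with
  | nil => cases h
  | cons p l ih =>
    simp only [pvEmitA, List.foldl_cons]
    rcases List.mem_cons.mp h with h | h
    · rw [← h]
      by_cases hc : PySem.Set.contains rs.2 x = true
      · simp only [hc, if_true]
        exact pvEmitA_mono _ _ _ hc
      · have hx : ¬ x ∈ rs.2 := by simpa [PySem.Set.contains] using hc
        rw [if_neg (by simpa [PySem.Set.contains] using hc)]
        apply pvEmitA_mono
        simp [PySem.Set.add, PySem.Set.contains, hx]
    · split
      · exact ih _ h
      · exact ih _ h

-- scanning a prefix whose elements are all in seen changes nothing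
theorem pvEmitA_skip (l1 l2 : List (List Int)) (rs : List (List Int) × PySem.Set (List Int))
    (h : ∀ x ∈ l1, PySem.Set.contains rs.2 x = true) :
    pvEmitA rs (l1 ++ l2) = pvEmitA rs l2 := by
  induction l1 with
  | nil => rfl
  | cons p l1 ih =>
    simp only [pvEmitA, List.cons_append, List.foldl_cons]
    rw [if_pos (h p (by simp))]
    exact ih (fun x hx => h x (by simp [hx]))

-- ---- A's fold as one dedup-emit over the concatenated stack snapshots ----

-- the concatenation of the stack snapshots (bottom→top) at each matched row
def pvEmit (S : PySem.Set Int) : List (List Int) → List (List Int) → List (List Int)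
  | _, [] => []
  | st, row :: rest =>
      let st' := row :: pvPop st (pvLvl row)
      (if PySem.Set.contains S (pvLvl row) then st'.reverse else []) ++ pvEmit S st' rest

theorem foldA_emit (S : PySem.Set Int) (tasks : List (List Int)) :
    ∀ (rs : List (List Int) × PySem.Set (List Int)) (st : List (List Int)),
    ((tasks.foldl (pvStepA S) (rs.1, rs.2, st)).1, (tasks.foldl (pvStepA S) (rs.1, rs.2, st)).2.1)
      = pvEmitA rs (pvEmit S st tasks) := by
  induction tasks with
  | nil => intro rs st; simp [pvEmit, pvEmitA]
  | cons row rest ih =>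
    intro rs st
    simp only [List.foldl_cons, pvStepA, pvEmit]
    by_cases hm : PySem.Set.contains S (pvLvl row) = true
    · simp only [hm, if_true, pvEmitA_append]
      exact ih (pvEmitA rs (row :: pvPop st (pvLvl row)).reverse) _
    · simp only [hm, Bool.false_eq_true, if_false, List.nil_append]
      exact ih rs _

-- ---- the backward threshold characterises exactly the rows A ever emits ----

def pvThr (m : Option Int) (x : List Int) : Bool :=
  match m with | some mv => decide (pvLvl x < mv) | none => false

-- B's selected rows, in index order
def pvSel (S : PySem.Set Int) (l : List (List Int)) : List (List Int) :=
  (l.zip (pvIncB S l).1).filterMap (fun p => if p.2 then some p.1 else none)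

theorem pvSel_cons (S : PySem.Set Int) (row : List Int) (rest : List (List Int)) :
    pvSel S (row :: rest) =
      (if PySem.Set.contains S (pvLvl row) || pvThr (pvIncB S rest).2 row then [row] else [])
        ++ pvSel S rest := by
  have hinc : (pvIncB S (row :: rest)).1
      = (PySem.Set.contains S (pvLvl row) || pvThr (pvIncB S rest).2 row) :: (pvIncB S rest).1 := by
    simp [pvIncB, pvThr]
  cases hb : (PySem.Set.contains S (pvLvl row) || pvThr (pvIncB S rest).2 row) <;>
    simp_all [pvSel]

-- the stack is strictly decreasing in level, top-first
def pvStDec (st : List (List Int)) : Prop :=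
  List.Pairwise (fun a b => pvLvl b < pvLvl a) st

theorem pvPop_eq_filter (st : List (List Int)) (l : Int) (h : pvStDec st) :
    pvPop st l = st.filter (fun x => decide (pvLvl x < l)) := by
  induction st with
  | nil => rfl
  | cons top rest ih =>
    rcases (List.pairwise_cons.mp h) with ⟨htop, hrest⟩
    simp only [pvPop, List.filter_cons]
    by_cases hc : l ≤ pvLvl top
    · rw [if_pos hc, if_neg (by simpa using not_lt.mpr hc)]
      exact ih hrest
    · rw [if_neg hc, if_pos (by simpa using lt_of_not_ge hc)]
      have : rest.filter (fun x => decide (pvLvl x < l)) = rest := by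
        apply List.filter_eq_self.mpr
        intro x hx
        have := htop x hx
        simp only [decide_eq_true_eq]
        omega
      rw [this]

theorem pvStDec_step (st : List (List Int)) (row : List Int) (h : pvStDec st) :
    pvStDec (row :: pvPop st (pvLvl row)) := by
  rw [pvPop_eq_filter st _ h]
  refine List.pairwise_cons.mpr ⟨?_, List.Pairwise.filter _ h⟩
  intro b hb
  simp only [List.mem_filter, decide_eq_true_eq] at hb
  exact hb.2

-- KEY: emitting through the stack machine, then deduping, equals deduping B's
-- backward-flagged selection preceded by the threshold-surviving stack entries.
theorem pvIncB_snd (S : PySem.Set Int) (row : List Int) (rest : List (List Int)) :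
    (pvIncB S (row :: rest)).2
      = if PySem.Set.contains S (pvLvl row) then some (pvLvl row)
        else match (pvIncB S rest).2 with
             | some mv => some (min (pvLvl row) mv) | none => none := rfl

theorem pvThr_none_filter (l : List (List Int)) : l.filter (pvThr none) = [] :=
  List.filter_eq_nil_iff.mpr (fun _ _ => by simp [pvThr])

-- KEY: emitting through the stack machine, then deduping, equals deduping B's
-- backward-flagged selection preceded by the threshold-surviving stack entries.
theorem pvKey (S : PySem.Set Int) (rest : List (List Int)) :
    ∀ (st : List (List Int)) (rs : List (List Int) × PySem.Set (List Int)), pvStDec st →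
    pvEmitA rs (pvEmit S st rest)
      = pvEmitA rs (st.reverse.filter (pvThr (pvIncB S rest).2) ++ pvSel S rest) := by
  induction rest with
  | nil =>
    intro st rs _
    simp [pvEmit, pvIncB, pvSel, pvThr_none_filter]
  | cons row rest ih =>
    intro st rs hdec
    have hdec' : pvStDec (row :: pvPop st (pvLvl row)) := pvStDec_step st row hdec
    have hpop : pvPop st (pvLvl row) = st.filter (fun x => decide (pvLvl x < pvLvl row)) :=
      pvPop_eq_filter st _ hdec
    simp only [pvEmit, pvSel_cons]
    by_cases hm : PySem.Set.contains S (pvLvl row) = true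
    · -- matched row: the whole current stack is deduped in now
      have hm2 : (pvIncB S (row :: rest)).2 = some (pvLvl row) := by
        rw [pvIncB_snd, if_pos hm]
      rw [hm2]
      simp only [hm, if_true, Bool.true_or, pvEmitA_append]
      rw [ih _ _ hdec']
      rw [pvEmitA_skip]
      · have hstack : st.reverse.filter (pvThr (some (pvLvl row)))
            = (pvPop st (pvLvl row)).reverse := by
          rw [hpop, ← List.filter_reverse]
          rfl
        rw [hstack, List.reverse_cons, pvEmitA_append]
      · intro x hx
        exact pvEmitA_mem _ _ _ (List.mem_filter.mp hx).1
    · -- unmatched row: thresholds compose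
      have hm' : PySem.Set.contains S (pvLvl row) = false := Bool.eq_false_iff.mpr hm
      simp only [hm', Bool.false_eq_true, if_false, List.nil_append]
      rw [ih _ _ hdec']
      have hthr : (row :: pvPop st (pvLvl row)).reverse.filter (pvThr (pvIncB S rest).2)
          = st.reverse.filter (pvThr (pvIncB S (row :: rest)).2)
            ++ (if pvThr (pvIncB S rest).2 row then [row] else []) := by
        cases hmv : (pvIncB S rest).2 with
        | none =>
          rw [pvIncB_snd, if_neg hm, hmv]
          simp [pvThr_none_filter, pvThr]
        | some mv =>
          rw [pvIncB_snd, if_neg hm, hmv]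
          simp only [List.reverse_cons, List.filter_append, List.filter_cons,
            List.filter_nil, hpop, ← List.filter_reverse, List.filter_filter]
          congr 1
          apply List.filter_congr
          intro x _
          by_cases h1 : pvLvl x < mv <;> by_cases h2 : pvLvl x < pvLvl row <;>
            simp [pvThr, h1, h2]
      rw [hthr, Bool.false_or, List.append_assoc]


-- B's forward pass is the dedup-emit over the selected rows
theorem foldB_sel (l : List (List Int × Bool)) :
    ∀ (rs : List (List Int) × PySem.Set (List Int)),
    l.foldl
      (fun rs p =>
        if p.2 then
          if PySem.Set.contains rs.2 p.1 then rs
          else (rs.1 ++ [p.1], PySem.Set.add rs.2 p.1)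
        else rs) rs
      = pvEmitA rs (l.filterMap (fun p => if p.2 then some p.1 else none)) := by
  induction l with
  | nil => intro rs; rfl
  | cons p l ih =>
    intro rs
    rcases p with ⟨row, f⟩
    cases f with
    | false =>
      simp only [List.foldl_cons, List.filterMap_cons, Bool.false_eq_true, if_false]
      exact ih rs
    | true =>
      simp only [List.foldl_cons, List.filterMap_cons]
      rw [ih]
      rfl

-- ===== VERDICT (by name: the statement is the Claim_ definition above) =====
theorem filter_by_levels_spec : Claim_equal_filter_by_levels := by
  intro tasks levels _ _
  unfold Spec_filter_by_levels filter_by_levels filter_by_levels_alt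
  by_cases h : levels = []
  · simp [h]
  · simp only [h, if_false]
    set S := PySem.Set.ofList levels
    have hA := congrArg Prod.fst (foldA_emit S tasks ([], PySem.Set.empty) [])
    simp only at hA
    rw [hA, pvKey S tasks [] ([], PySem.Set.empty) List.Pairwise.nil]
    rw [foldB_sel]
    simp [pvSel]
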